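-- pv_equiv track=rewrite | github.com/NhatPham123tm/ML_Two_Agents_Transportation | run_experiment.py | _normalize_seeds
-- ===== SOURCE A (Python) =====
-- def _normalize_seeds(user_list, fallback, runs):
--     """
--     Returns a list of length `runs`.
--     - If user_list is empty: use fallback
--     - If shorter than runs: repeat/cycle to fill
--     - If longer: truncate
--     """
--     base = user_list if user_list else fallback
--     if len(base) == runs:
--         return base
--     if len(base) > runs:
--         return base[:runs]
--     # len(base) < runs -> repeat
--     out = []
--     i = 0
--     while len(out) < runs:
--         out.append(base[i % len(base)])
--         i += 1
--     return out
-- ===== SOURCE B (Python) =====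
-- def _normalize_seeds(user_list, fallback, runs):
--     base = user_list if user_list else fallback
--     n = len(base)
--     if n >= runs:
--         return base if n == runs else base[:runs]
--     q, r = divmod(runs, n)
--     return base * q + base[:r]
-- ===== Notes on version B (the rewrite author's own statement) =====
-- stated objective: simpler
-- what changed: Replaces the element-by-element while-loop (appending base[i % n] until length runs) with a closed-form fill: divmod(runs, n) then list multiplication plus a slice.
import Mathlib
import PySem

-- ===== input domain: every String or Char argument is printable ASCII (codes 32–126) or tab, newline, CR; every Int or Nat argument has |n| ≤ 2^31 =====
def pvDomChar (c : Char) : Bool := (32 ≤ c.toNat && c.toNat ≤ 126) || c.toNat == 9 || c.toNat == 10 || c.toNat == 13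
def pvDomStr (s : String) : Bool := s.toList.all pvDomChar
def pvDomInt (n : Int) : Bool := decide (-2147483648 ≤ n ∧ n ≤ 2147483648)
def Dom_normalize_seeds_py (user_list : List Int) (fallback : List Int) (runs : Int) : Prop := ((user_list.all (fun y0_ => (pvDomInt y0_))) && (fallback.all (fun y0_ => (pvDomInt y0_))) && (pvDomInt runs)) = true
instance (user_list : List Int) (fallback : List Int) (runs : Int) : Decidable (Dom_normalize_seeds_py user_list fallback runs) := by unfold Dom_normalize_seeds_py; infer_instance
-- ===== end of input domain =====

-- B replaces A's element-by-element while-loop fill with divmod + list repetition + a slice (objective: simpler).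

-- ===== PORT A =====
-- while len(out) < runs: out.append(base[i % len(base)]); i += 1
-- (base = [] with runs > 0 is Python's ZeroDivisionError, excluded by Pre_; the port returns out there)
def pvLoopA (base : List Int) (runs : Int) (out : List Int) (i : Int) : List Int :=
  if _h : (out.length : Int) < runs then
    if base = [] then out
    else pvLoopA base runs (out ++ [(PySem.List.pyGet? base (PySem.Int.mod i (base.length : Int))).getD 0]) (i + 1)
  else out
termination_by (runs - out.length).toNat
decreasing_by simp; omega

def normalize_seeds_py (user_list : List Int) (fallback : List Int) (runs : Int) : List Int :=
  let base := if user_list = [] then fallback else user_list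
  if (base.length : Int) = runs then base
  else if (base.length : Int) > runs then PySem.List.slice base none (some runs)
  else pvLoopA base runs [] 0

-- ===== PORT B =====
def normalize_seeds_py_alt (user_list : List Int) (fallback : List Int) (runs : Int) : List Int :=
  let base := if user_list = [] then fallback else user_list
  let n : Int := base.length
  if n ≥ runs then
    if n = runs then base else PySem.List.slice base none (some runs)
  else
    -- q, r = divmod(runs, n); base * q + base[:r]   (n = 0 here is Python's ZeroDivisionError, excluded by Pre_)
    let q := PySem.Int.floordiv runs n
    let r := PySem.Int.mod runs n
    (List.replicate q.toNat base).flatten ++ PySem.List.slice base none (some r)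

-- ===== PRECONDITION & SPEC =====
-- Pre_ excludes exactly the inputs where A raises ZeroDivisionError (both lists empty and runs > 0);
-- B raises ZeroDivisionError there too (divmod(runs, 0)).
def Pre_normalize_seeds_py (user_list : List Int) (fallback : List Int) (runs : Int) : Prop :=
  ¬ (user_list = [] ∧ fallback = [] ∧ 0 < runs)
instance (user_list : List Int) (fallback : List Int) (runs : Int) : Decidable (Pre_normalize_seeds_py user_list fallback runs) := by unfold Pre_normalize_seeds_py; infer_instance

def pvWitness_normalize_seeds_py : List Int × List Int × Int := ([1, 2], [], 5)

def Spec_normalize_seeds_py (user_list : List Int) (fallback : List Int) (runs : Int) (out : List Int) : Prop := out = normalize_seeds_py_alt user_list fallback runs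
instance (user_list : List Int) (fallback : List Int) (runs : Int) (out : List Int) : Decidable (Spec_normalize_seeds_py user_list fallback runs out) := by unfold Spec_normalize_seeds_py; infer_instance

-- ===== CLAIM (what is proved, stated in full; the proofs are below) =====
def Claim_equal_normalize_seeds_py : Prop := ∀ (user_list : List Int) (fallback : List Int) (runs : Int), Dom_normalize_seeds_py user_list fallback runs → Pre_normalize_seeds_py user_list fallback runs → Spec_normalize_seeds_py user_list fallback runs (normalize_seeds_py user_list fallback runs)

-- ===== LEMMAS AND PROOFS =====

-- the cyclic fill of length m starting at index i
def pvFill (base : List Int) (i : Nat) : Nat → List Int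
  | 0 => []
  | m + 1 => base.getD (i % base.length) 0 :: pvFill base (i + 1) m

theorem pvLoopA_eq_fill (base : List Int) (hb : base ≠ []) :
    ∀ (m : Nat) (out : List Int) (i : Nat) (runs : Int), runs = (out.length : Int) + m →
      pvLoopA base runs out (i : Int) = out ++ pvFill base i m := by
  intro m
  induction m with
  | zero =>
    intro out i runs hr
    rw [pvLoopA]
    simp [pvFill, hr]
  | succ m ih =>
    intro out i runs hr
    rw [pvLoopA]
    have hlt : (out.length : Int) < runs := by omega
    rw [dif_pos hlt, if_neg hb]
    have hn : 0 < base.length := List.length_pos_of_ne_nil hb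
    have hmod : PySem.Int.mod (i : Int) (base.length : Int) = ((i % base.length : Nat) : Int) :=
      PySem.Int.mod_natCast i base.length
    have hv : (PySem.List.pyGet? base (PySem.Int.mod (i : Int) (base.length : Int))).getD 0
        = base.getD (i % base.length) 0 := by
      rw [hmod, PySem.List.pyGet?_natCast]
      simp [List.getD]
    have hi1 : (i : Int) + 1 = ((i + 1 : Nat) : Int) := by push_cast; ring
    rw [hv, hi1, ih (out ++ [base.getD (i % base.length) 0]) (i + 1) runs (by simp; omega)]
    simp [pvFill]

theorem pvFill_congr (base : List Int) :
    ∀ (m i j : Nat), i % base.length = j % base.length → pvFill base i m = pvFill base j m := by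
  intro m
  induction m with
  | zero => intro i j _; rfl
  | succ m ih =>
    intro i j h
    simp only [pvFill, h]
    rw [ih (i + 1) (j + 1) (by simp [Nat.add_mod, h])]

theorem pvFill_split (base : List Int) :
    ∀ (a : Nat) (i b : Nat), pvFill base i (a + b) = pvFill base i a ++ pvFill base (i + a) b := by
  intro a
  induction a with
  | zero => intro i b; simp [pvFill]
  | succ a ih =>
    intro i b
    have h1 : a + 1 + b = (a + b) + 1 := by omega
    rw [h1]
    simp only [pvFill]
    rw [ih (i + 1) b]
    simp only [List.cons_append]
    have h2 : i + 1 + a = i + (a + 1) := by omega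
    rw [h2]

theorem pvFill_take (base : List Int) :
    ∀ (m i : Nat), i + m ≤ base.length → pvFill base i m = (base.drop i).take m := by
  intro m
  induction m with
  | zero => intro i _; simp [pvFill]
  | succ m ih =>
    intro i h
    have hi : i < base.length := by omega
    simp only [pvFill]
    rw [Nat.mod_eq_of_lt hi, List.getD_eq_getElem base 0 hi]
    rw [List.drop_eq_getElem_cons hi, List.take_succ_cons]
    rw [ih (i + 1) (by omega)]

theorem pvRepflat_eq_fill (base : List Int) (_hb : base ≠ []) :
    ∀ (q r : Nat), r ≤ base.length →
      (List.replicate q base).flatten ++ base.take r = pvFill base 0 (q * base.length + r) := by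
  intro q
  induction q with
  | zero =>
    intro r hr
    simp
    rw [pvFill_take base r 0 (by omega)]
    simp
  | succ q ih =>
    intro r hr
    have h1 : (q + 1) * base.length + r = base.length + (q * base.length + r) := by ring
    rw [h1, pvFill_split base base.length 0 (q * base.length + r)]
    have h2 : pvFill base 0 base.length = base := by
      rw [pvFill_take base base.length 0 (by omega)]; simp
    have h3 : pvFill base (0 + base.length) (q * base.length + r) = pvFill base 0 (q * base.length + r) := by
      apply pvFill_congr; simp
    rw [h2, h3, ← ih r hr]
    simp [List.replicate_succ]

-- ===== VERDICT (by name: the statement is the Claim_ definition above) =====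
theorem normalize_seeds_py_spec : Claim_equal_normalize_seeds_py := by
  intro user_list fallback runs _ hpre
  unfold Spec_normalize_seeds_py normalize_seeds_py normalize_seeds_py_alt
  set base := if user_list = [] then fallback else user_list with hbase
  simp only []
  by_cases heq : (base.length : Int) = runs
  · simp [heq]
  · by_cases hgt : (base.length : Int) > runs
    · rw [if_neg heq, if_pos hgt, if_pos (le_of_lt hgt), if_neg heq]
    · -- n < runs : loop vs closed form
      have hlt : (base.length : Int) < runs := by omega
      rw [if_neg heq, if_neg hgt, if_neg (by omega : ¬ (base.length : Int) ≥ runs)]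
      have hb : base ≠ [] := by
        intro h
        rw [hbase] at h
        by_cases hu : user_list = []
        · refine hpre ⟨hu, by simpa [hu] using h, ?_⟩
          have : base = [] := by rw [hbase]; simpa [hu] using h
          rw [this] at hlt; simpa using hlt
        · exact hu (by simpa [hu] using h)
      have hn : 0 < base.length := List.length_pos_of_ne_nil hb
      have hnpos : (0 : Int) < (base.length : Int) := by exact_mod_cast hn
      -- A side
      have hA : pvLoopA base runs [] 0 = pvFill base 0 runs.toNat := by
        have h0 : (0 : Int) = ((0 : Nat) : Int) := rfl
        rw [h0, pvLoopA_eq_fill base hb runs.toNat [] 0 runs (by simp; omega)]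
        simp
      -- B side
      set q := PySem.Int.floordiv runs (base.length : Int) with hq
      set r := PySem.Int.mod runs (base.length : Int) with hr
      have hdm : q * (base.length : Int) + r = runs := PySem.Int.floordiv_mul_add_mod runs _
      have hr0 : 0 ≤ r := PySem.Int.mod_nonneg runs hnpos
      have hrlt : r < (base.length : Int) := PySem.Int.mod_lt runs hnpos
      have hq0 : 0 ≤ q := by nlinarith
      have hslice : PySem.List.slice base none (some r) = base.take r.toNat :=
        PySem.List.slice_to base hr0
      have hint : ((q.toNat * base.length + r.toNat : Nat) : Int) = runs := by
        push_cast
        rw [Int.toNat_of_nonneg hq0, Int.toNat_of_nonneg hr0]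
        linarith
      have hnat : q.toNat * base.length + r.toNat = runs.toNat := by omega
      rw [hA, hslice, pvRepflat_eq_fill base hb q.toNat r.toNat (by omega), hnat]
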